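-- pv_equiv track=rewrite | github.com/roiei/algo | leet_code/599. Minimum Index Sum of Two Lists.py | findRestaurant2
-- ===== SOURCE A (Python) =====
-- def findRestaurant2(list1: 'List[str]', list2: 'List[str]') -> 'List[str]':
--     adict  = {}
--     ml = min(len(list1), len(list2))
--     if ml == len(list1):
--         mlist = list1
--         olist = list2
--     else:
--         mlist = list2
--         olist = list1
--     for i in range(ml):
--         if mlist[i] not in adict:
--             if mlist[i] in olist:
--                 adict[mlist[i]] = i + olist.index(mlist[i])
--     res = sorted(adict.items(), key=lambda param: param[1])
--     out = []
--     pval = res[0][1]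
--     for r in res:
--         if pval != r[1]:
--             break
--         out.append(r[0])
--     return out
-- ===== SOURCE B (Python) =====
-- def findRestaurant2(list1: 'List[str]', list2: 'List[str]') -> 'List[str]':
--     # One pass: hash olist value -> first index, then scan mlist tracking the minimum index sum.
--     if len(list1) <= len(list2):
--         mlist, olist = list1, list2
--     else:
--         mlist, olist = list2, list1
--     pos = {}
--     for j, s in enumerate(olist):
--         if s not in pos:
--             pos[s] = j
--     best = None
--     out = []
--     seen = set()
--     for i, s in enumerate(mlist):
--         if s not in seen and s in pos:
--             seen.add(s)
--             t = i + pos[s]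
--             if best is None or t < best:
--                 best = t
--                 out = [s]
--             elif t == best:
--                 out.append(s)
--     return out
-- ===== Notes on version B (the rewrite author's own statement) =====
-- stated objective: faster
-- what changed: B builds a value->first-index dict for the longer list once and finds all minimum-index-sum strings in a single min-tracking pass over the shorter list, instead of A's per-element linear 'in'/'.index' scans followed by sorting the dict items and taking the equal-value prefix.
import Mathlib
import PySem

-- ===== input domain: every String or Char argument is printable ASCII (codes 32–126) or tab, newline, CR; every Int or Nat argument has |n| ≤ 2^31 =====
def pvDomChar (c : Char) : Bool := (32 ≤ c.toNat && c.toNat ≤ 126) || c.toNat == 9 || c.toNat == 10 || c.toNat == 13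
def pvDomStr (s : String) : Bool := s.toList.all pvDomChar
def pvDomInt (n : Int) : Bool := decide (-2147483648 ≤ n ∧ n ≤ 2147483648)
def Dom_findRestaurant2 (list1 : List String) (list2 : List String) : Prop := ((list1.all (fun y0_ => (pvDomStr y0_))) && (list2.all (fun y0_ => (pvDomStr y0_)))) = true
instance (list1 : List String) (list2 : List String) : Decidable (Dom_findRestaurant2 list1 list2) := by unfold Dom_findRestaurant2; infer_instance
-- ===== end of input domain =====

-- B replaces A's per-element linear scans of olist ('in' and '.index') by a dict built once
-- and replaces sort-then-prefix by a single min-tracking pass.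

-- ===== PORT A =====
-- helper for A's final loop: 'for r in res: if pval != r[1]: break; out.append(r[0])'
def loopA (pval : Int) : List (String × Int) → List String → List String
  | [], out => out
  | r :: rest, out => if pval ≠ r.2 then out else loopA pval rest (out ++ [r.1])

def findRestaurant2 (list1 : List String) (list2 : List String) : List String :=
  let ml : Int := min (PySem.List.len list1) (PySem.List.len list2)
  let mlist := if ml = PySem.List.len list1 then list1 else list2
  let olist := if ml = PySem.List.len list1 then list2 else list1
  let adict : PySem.Dict String Int :=
    (PySem.List.pyRange 0 ml 1).foldl (fun d i =>
      let s := PySem.List.pyGetD mlist i ""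
      if d.contains s = false then
        if olist.contains s then
          d.insert s (i + (((PySem.List.index? olist s).getD 0 : Nat) : Int))
        else d
      else d) PySem.Dict.empty
  let res := PySem.List.sorted adict.items (fun p => p.2) false
  match PySem.List.pyGet? res 0 with
  | none => []        -- Python raises IndexError at res[0]; excluded by Pre_
  | some r0 => loopA r0.2 res []

-- ===== PORT B =====
def findRestaurant2_alt (list1 : List String) (list2 : List String) : List String :=
  let mlist := if PySem.List.len list1 ≤ PySem.List.len list2 then list1 else list2
  let olist := if PySem.List.len list1 ≤ PySem.List.len list2 then list2 else list1
  let pos : PySem.Dict String Int :=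
    (PySem.List.enumerate olist).foldl (fun d p =>
      if d.contains p.2 = true then d else d.insert p.2 p.1) PySem.Dict.empty
  let fin :=
    (PySem.List.enumerate mlist).foldl (fun (st : Option Int × List String × PySem.Set String) p =>
      if PySem.Set.contains st.2.2 p.2 = false ∧ pos.contains p.2 = true then
        let seen := PySem.Set.add st.2.2 p.2
        let t := p.1 + pos.getD p.2 0
        match st.1 with
        | none => (some t, [p.2], seen)
        | some b =>
          if t < b then (some t, [p.2], seen)
          else if t = b then (some b, st.2.1 ++ [p.2], seen)
          else (some b, st.2.1, seen)
      else st) ((none : Option Int), ([] : List String), PySem.Set.empty)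
  fin.2.1

-- ===== PRECONDITION & SPEC =====
-- Pre_ excludes exactly the inputs with no common string, where A raises IndexError at res[0].
def Pre_findRestaurant2 (list1 : List String) (list2 : List String) : Prop :=
  ∃ s ∈ list1, s ∈ list2
instance (list1 : List String) (list2 : List String) : Decidable (Pre_findRestaurant2 list1 list2) := by unfold Pre_findRestaurant2; infer_instance
def pvWitness_findRestaurant2 : List String × List String := (["a", "b"], ["b", "c"])

def Spec_findRestaurant2 (list1 : List String) (list2 : List String) (out : List String) : Prop := out = findRestaurant2_alt list1 list2
instance (list1 : List String) (list2 : List String) (out : List String) : Decidable (Spec_findRestaurant2 list1 list2 out) := by unfold Spec_findRestaurant2; infer_instance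

-- ===== CLAIM (what is proved, stated in full; the proofs are below) =====
def Claim_equal_findRestaurant2 : Prop := ∀ (list1 : List String) (list2 : List String), Dom_findRestaurant2 list1 list2 → Pre_findRestaurant2 list1 list2 → Spec_findRestaurant2 list1 list2 (findRestaurant2 list1 list2)

-- ===== LEMMAS AND PROOFS =====

-- A's dict-building step, abstracted over the already-chosen (mlist, olist)
def stepA (olist : List String) (d : PySem.Dict String Int) (p : Int × String) : PySem.Dict String Int :=
  if d.contains p.2 = false then
    if olist.contains p.2 then
      d.insert p.2 (p.1 + (((PySem.List.index? olist p.2).getD 0 : Nat) : Int))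
    else d
  else d

-- the candidate stream both programs process: first occurrences in mlist that occur in olist,
-- paired with their index sum
def cands (olist : List String) : List (Int × String) → List String → List (String × Int)
  | [], _ => []
  | p :: rest, seen =>
    if seen.contains p.2 = false then
      if olist.contains p.2 then
        (p.2, p.1 + (((PySem.List.index? olist p.2).getD 0 : Nat) : Int)) :: cands olist rest (seen ++ [p.2])
      else cands olist rest seen
    else cands olist rest seen

-- B's min-tracking pass, abstracted to the candidate stream
def mf : List (String × Int) → Option Int × List String → Option Int × List String
  | [], st => st
  | q :: rest, st =>
    match st.1 with
    | none => mf rest (some q.2, [q.1])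
    | some b =>
      if q.2 < b then mf rest (some q.2, [q.1])
      else if q.2 = b then mf rest (some b, st.2 ++ [q.1])
      else mf rest (some b, st.2)

def vmin (b : Int) (l : List (String × Int)) : Int := l.foldl (fun a q => min a q.2) b

theorem loopA_eq (pval : Int) : ∀ (l : List (String × Int)) (out : List String),
    loopA pval l out = out ++ (l.takeWhile (fun r => decide (pval = r.2))).map (·.1) := by
  intro l
  induction l with
  | nil => intro out; simp [loopA]
  | cons r rest ih =>
    intro out
    by_cases h : pval = r.2
    · subst h
      rw [loopA, if_neg (by simp), ih]
      simp
    · simp [loopA, h]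


theorem dict_items (olist : List String) : ∀ (l : List (Int × String)) (d : PySem.Dict String Int),
    d.keys.Nodup →
    (l.foldl (stepA olist) d).items = d.items ++ cands olist l d.keys := by
  intro l
  induction l with
  | nil => intro d hnd; simp [cands]
  | cons p rest ih =>
    intro d hnd
    rw [List.foldl_cons]
    by_cases hc : d.contains p.2 = false
    · have hknotmem : p.2 ∉ d.keys := fun hm => by
        simp [(PySem.Dict.contains_iff_mem_keys d p.2).mpr hm] at hc
      have hkc : d.keys.contains p.2 = false := by simpa using hknotmem
      by_cases ho : olist.contains p.2
      · have hstep : stepA olist d p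
            = d.insert p.2 (p.1 + (((PySem.List.index? olist p.2).getD 0 : Nat) : Int)) := by
          simp only [stepA]; rw [if_pos hc, if_pos ho]
        rw [hstep, ih _ (PySem.Dict.nodup_keys_insert _ _ _ hnd)]
        rw [PySem.Dict.items_insert_of_not_contains _ _ hc,
            PySem.Dict.keys_insert_of_not_contains _ _ hc]
        simp only [cands, hkc, ho]
        simp [List.append_assoc]
      · have hstep : stepA olist d p = d := by
          simp only [stepA]; rw [if_pos hc, if_neg ho]
        rw [hstep, ih _ hnd]
        simp only [cands, hkc, ho]
        simp
    · have hstep : stepA olist d p = d := by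
        simp only [stepA]; rw [if_neg hc]
      have hkc : d.keys.contains p.2 = true := by
        simp only [Bool.not_eq_false] at hc
        simpa using (PySem.Dict.contains_iff_mem_keys d p.2).mp hc
      rw [hstep, ih _ hnd]
      simp only [cands, hkc]
      simp


theorem posfold_get? : ∀ (l : List (Int × String)) (d : PySem.Dict String Int) (s : String),
    (l.foldl (fun d p => if d.contains p.2 = true then d else d.insert p.2 p.1) d).get? s
      = ((d.get? s).or (((l.find? (fun p => p.2 == s)).map (·.1)))) := by
  intro l
  induction l with
  | nil => intro d s; simp
  | cons p rest ih =>
    intro d s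
    rw [List.foldl_cons]
    by_cases hc : d.contains p.2 = true
    · rw [if_pos hc, ih]
      by_cases hps : p.2 = s
      · subst hps
        rw [PySem.Dict.contains_eq_isSome_get?] at hc
        cases hsome : d.get? p.2 with
        | none => rw [hsome] at hc; simp at hc
        | some v => simp
      · rw [List.find?_cons_of_neg (by simpa using hps)]
    · rw [if_neg hc, ih]
      by_cases hps : p.2 = s
      · subst hps
        have hnone : d.get? p.2 = none := by
          rw [PySem.Dict.contains_eq_isSome_get?] at hc
          cases hsome : d.get? p.2 with
          | none => rfl
          | some v => rw [hsome] at hc; simp at hc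
        rw [PySem.Dict.get?_insert, if_pos rfl, hnone,
            List.find?_cons_of_pos (by simp)]
        simp
      · rw [PySem.Dict.get?_insert, if_neg (fun e => hps e.symm),
            List.find?_cons_of_neg (by simpa using hps)]


theorem find?_enumerate (s : String) : ∀ (ol : List String) (k : Int),
    ((PySem.List.enumerate ol k).find? (fun p => p.2 == s)).map (·.1)
      = (PySem.List.index? ol s).map (fun n => k + (n : Int)) := by
  intro ol
  induction ol with
  | nil => intro k; simp [PySem.List.enumerate, PySem.List.index?]
  | cons x xs ih =>
    intro k
    rw [PySem.List.enumerate_cons]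
    by_cases h : x = s
    · subst h
      rw [PySem.List.index?_cons_self, List.find?_cons_of_pos (by simp)]
      simp
    · rw [List.find?_cons_of_neg (by simpa using h)]
      rw [ih (k + 1), PySem.List.index?_cons_of_ne _ h]
      cases PySem.List.index? xs s with
      | none => simp
      | some n => simp; push_cast; ring


theorem vmin_le : ∀ (l : List (String × Int)) (b : Int), vmin b l ≤ b ∧ ∀ q ∈ l, vmin b l ≤ q.2 := by
  intro l
  induction l with
  | nil => intro b; exact ⟨le_refl b, by simp⟩
  | cons q rest ih =>
    intro b
    have h := ih (min b q.2)
    refine ⟨le_trans h.1 (min_le_left _ _), ?_⟩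
    intro p hp
    rcases List.mem_cons.mp hp with h' | h'
    · subst h'; exact le_trans h.1 (min_le_right _ _)
    · exact h.2 p h'


theorem vmin_attained : ∀ (l : List (String × Int)) (b : Int),
    vmin b l = b ∨ ∃ q ∈ l, vmin b l = q.2 := by
  intro l
  induction l with
  | nil => intro b; left; rfl
  | cons q rest ih =>
    intro b
    have hv : vmin b (q :: rest) = vmin (min b q.2) rest := by simp [vmin]
    rcases ih (min b q.2) with h | ⟨p, hp, he⟩
    · by_cases hle : b ≤ q.2
      · left; rw [hv, h, min_eq_left hle]
      · right
        exact ⟨q, List.mem_cons_self, by rw [hv, h, min_eq_right (by omega)]⟩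
    · right; exact ⟨p, List.mem_cons_of_mem _ hp, by rw [hv, he]⟩
theorem mf_some : ∀ (l : List (String × Int)) (b : Int) (out : List String),
    mf l (some b, out)
      = (some (vmin b l),
         (if vmin b l = b then out else []) ++ (l.filter (fun q => q.2 == vmin b l)).map (·.1)) := by
  intro l
  induction l with
  | nil => intro b out; simp [mf, vmin]
  | cons q rest ih =>
    intro b out
    have hle : vmin (min b q.2) rest ≤ min b q.2 := (vmin_le rest _).1
    have hv : vmin b (q :: rest) = vmin (min b q.2) rest := by simp [vmin]
    rcases lt_trichotomy q.2 b with hlt | heq | hgt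
    · rw [show mf (q :: rest) (some b, out) = mf rest (some q.2, [q.1]) from by
        simp [mf, hlt], ih, hv, min_eq_right hlt.le]
      have hne : vmin q.2 rest ≠ b := by
        have := (vmin_le rest q.2).1; omega
      rw [if_neg hne]
      by_cases hm : vmin q.2 rest = q.2
      · simp [List.filter_cons, hm]
      · have hq : (q.2 == vmin q.2 rest) = false := by
          simp only [beq_eq_false_iff_ne]; exact fun e => hm e.symm
        simp [List.filter_cons, hm, hq]
    · subst heq
      rw [show mf (q :: rest) (some q.2, out) = mf rest (some q.2, out ++ [q.1]) from by
        simp [mf], ih, hv, min_self]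
      by_cases hm : vmin q.2 rest = q.2
      · simp [List.filter_cons, hm]
      · have hq : (q.2 == vmin q.2 rest) = false := by
          simp only [beq_eq_false_iff_ne]; exact fun e => hm e.symm
        simp [List.filter_cons, hm, hq]
    · rw [show mf (q :: rest) (some b, out) = mf rest (some b, out) from by
        simp only [mf]; rw [if_neg (by omega), if_neg (by omega)], ih, hv, min_eq_left hgt.le]
      have hne : vmin b rest ≠ q.2 := by
        have := (vmin_le rest b).1; omega
      have hq : (q.2 == vmin b rest) = false := by
        simp only [beq_eq_false_iff_ne]; exact fun e => hne e.symm
      simp [List.filter_cons, hq]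
theorem mf_min (q : String × Int) (rest : List (String × Int)) :
    (mf (q :: rest) (none, [])).2
      = (((q :: rest).filter (fun r => r.2 == vmin q.2 rest)).map (·.1)) := by
  have h1 : mf (q :: rest) (none, []) = mf rest (some q.2, [q.1]) := by simp [mf]
  rw [h1, mf_some]
  by_cases hm : vmin q.2 rest = q.2 <;>
    simp [hm, List.filter_cons, beq_iff_eq] <;> simp [Ne.symm hm]


theorem ib_pairwise (x : String × Int) : ∀ (acc : List (String × Int)),
    acc.Pairwise (fun a b => a.2 ≤ b.2) →
    (PySem.List.insertBy (fun a b => decide (a.2 < b.2)) x acc).Pairwise (fun a b => a.2 ≤ b.2) := by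
  intro acc
  induction acc with
  | nil => intro _; simp [PySem.List.insertBy]
  | cons y ys ih =>
    intro hp
    rw [List.pairwise_cons] at hp
    by_cases hxy : x.2 < y.2
    · rw [show PySem.List.insertBy (fun a b => decide (a.2 < b.2)) x (y :: ys) = x :: y :: ys from by
        simp [PySem.List.insertBy, hxy]]
      rw [List.pairwise_cons]
      refine ⟨?_, List.pairwise_cons.mpr hp⟩
      intro z hz
      rcases List.mem_cons.mp hz with h | h
      · subst h; exact hxy.le
      · exact le_trans hxy.le (hp.1 z h)
    · rw [show PySem.List.insertBy (fun a b => decide (a.2 < b.2)) x (y :: ys)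
            = y :: PySem.List.insertBy (fun a b => decide (a.2 < b.2)) x ys from by
        simp [PySem.List.insertBy, hxy]]
      rw [List.pairwise_cons]
      refine ⟨?_, ih hp.2⟩
      intro z hz
      rcases (PySem.List.mem_insertBy _ _ _ _).mp hz with h | h
      · subst h; omega
      · exact hp.1 z h


theorem ib_filter (m : Int) (x : String × Int) : ∀ (acc : List (String × Int)),
    acc.Pairwise (fun a b => a.2 ≤ b.2) →
    (PySem.List.insertBy (fun a b => decide (a.2 < b.2)) x acc).filter (fun r => r.2 == m)
      = if x.2 == m then acc.filter (fun r => r.2 == m) ++ [x] else acc.filter (fun r => r.2 == m) := by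
  intro acc
  induction acc with
  | nil =>
    intro _
    by_cases hx : (x.2 == m) <;> simp [PySem.List.insertBy, List.filter_cons, hx]
  | cons y ys ih =>
    intro hp
    rw [List.pairwise_cons] at hp
    by_cases hxy : x.2 < y.2
    · rw [show PySem.List.insertBy (fun a b => decide (a.2 < b.2)) x (y :: ys) = x :: y :: ys from by
        simp [PySem.List.insertBy, hxy]]
      by_cases hx : (x.2 == m)
      · have hxm : x.2 = m := by simpa using hx
        have hnil : (y :: ys).filter (fun r => r.2 == m) = [] := by
          rw [List.filter_eq_nil_iff]
          intro z hz
          have hzy : y.2 ≤ z.2 := by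
            rcases List.mem_cons.mp hz with h | h
            · subst h; exact le_refl _
            · exact hp.1 z h
          simp only [beq_eq_false_iff_ne, ne_eq, beq_iff_eq]
          omega
        rw [if_pos hx]
        simp [List.filter_cons, hx, hnil]
      · rw [if_neg hx]
        simp [List.filter_cons, hx]
    · rw [show PySem.List.insertBy (fun a b => decide (a.2 < b.2)) x (y :: ys)
            = y :: PySem.List.insertBy (fun a b => decide (a.2 < b.2)) x ys from by
        simp [PySem.List.insertBy, hxy]]
      by_cases hx : (x.2 == m) = true <;>
        by_cases hy : (y.2 == m) = true <;>
          simp [List.filter_cons, ih hp.2, hx, hy]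


theorem foldl_ib_filter (m : Int) : ∀ (C acc : List (String × Int)),
    acc.Pairwise (fun a b => a.2 ≤ b.2) →
    (C.foldl (fun acc x => PySem.List.insertBy (fun a b => decide (a.2 < b.2)) x acc) acc).filter
        (fun r => r.2 == m)
      = acc.filter (fun r => r.2 == m) ++ C.filter (fun r => r.2 == m) := by
  intro C
  induction C with
  | nil => intro acc h; simp
  | cons x xs ih =>
    intro acc h
    rw [List.foldl_cons, ih _ (ib_pairwise x acc h), ib_filter m x acc h]
    by_cases hx : (x.2 == m) = true <;> simp [List.filter_cons, hx]

theorem sorted_filter (m : Int) (C : List (String × Int)) :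
    (PySem.List.sorted C (fun p => p.2) false).filter (fun r => r.2 == m)
      = C.filter (fun r => r.2 == m) := by
  rw [PySem.List.sorted_eq_foldl_insertBy]
  simpa using foldl_ib_filter m C [] (by simp)


theorem takeWhile_eq_filter_min (m : Int) : ∀ (l : List (String × Int)),
    (∀ y ∈ l, m ≤ y.2) → l.Pairwise (fun a b => a.2 ≤ b.2) →
    l.takeWhile (fun r => decide (m = r.2)) = l.filter (fun r => r.2 == m) := by
  intro l
  induction l with
  | nil => intro _ _; simp
  | cons y ys ih =>
    intro hmin hpw
    rw [List.pairwise_cons] at hpw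
    by_cases hy : y.2 = m
    · rw [List.takeWhile_cons_of_pos (by simp [hy]), List.filter_cons_of_pos (by simp [hy])]
      rw [ih (fun z hz => hmin z (List.mem_cons_of_mem _ hz)) hpw.2]
    · have hlt : m < y.2 :=
        lt_of_le_of_ne (hmin y List.mem_cons_self) (fun e => hy e.symm)
      rw [List.takeWhile_cons_of_neg (by simpa using fun e => hy e.symm),
          List.filter_cons_of_neg (by simpa using hy)]
      symm
      rw [List.filter_eq_nil_iff]
      intro z hz
      have := hpw.1 z hz
      simp only [beq_eq_false_iff_ne, ne_eq, beq_iff_eq]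
      omega


theorem cands_nil_no_common (olist : List String) : ∀ (l : List (Int × String)) (seen : List String),
    cands olist l seen = [] → ∀ p ∈ l, p.2 ∈ olist → p.2 ∈ seen := by
  intro l
  induction l with
  | nil => intro seen h p hp; simp at hp
  | cons q rest ih =>
    intro seen h p hp hpo
    by_cases hs : seen.contains q.2 = false
    · by_cases ho : olist.contains q.2
      · rw [cands, if_pos hs, if_pos ho] at h; exact absurd h (by simp)
      · rw [cands, if_pos hs, if_neg ho] at h
        rcases List.mem_cons.mp hp with h' | h'
        · subst h'; exact absurd (by simpa using hpo) ho
        · exact ih seen h p h' hpo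
    · rw [cands, if_neg hs] at h
      rcases List.mem_cons.mp hp with h' | h'
      · subst h'
        simp at hs
        exact hs
      · exact ih seen h p h' hpo


theorem bloop (olist : List String) (pos : PySem.Dict String Int)
    (hcont : ∀ s, pos.contains s = olist.contains s)
    (hget : ∀ s, s ∈ olist → pos.getD s 0 = (((PySem.List.index? olist s).getD 0 : Nat) : Int)) :
    ∀ (l : List (Int × String)) (best : Option Int) (out seen : List String),
    (l.foldl (fun (st : Option Int × List String × PySem.Set String) p =>
      if PySem.Set.contains st.2.2 p.2 = false ∧ pos.contains p.2 = true then
        let seen := PySem.Set.add st.2.2 p.2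
        let t := p.1 + pos.getD p.2 0
        match st.1 with
        | none => (some t, [p.2], seen)
        | some b =>
          if t < b then (some t, [p.2], seen)
          else if t = b then (some b, st.2.1 ++ [p.2], seen)
          else (some b, st.2.1, seen)
      else st) (best, out, seen)).2.1
      = (mf (cands olist l seen) (best, out)).2 := by
  intro l
  induction l with
  | nil => intro best out seen; simp [cands, mf]
  | cons p rest ih =>
    intro best out seen
    simp only [List.foldl_cons]
    by_cases hs : PySem.Set.contains seen p.2 = false
    · by_cases hc : pos.contains p.2 = true
      · have ho : olist.contains p.2 = true := by rw [← hcont]; exact hc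
        have hmem : p.2 ∈ olist := by simpa using ho
        have hsl : List.contains seen p.2 = false := by
          simpa using hs
        have hnot : p.2 ∉ seen := by simpa using hs
        have hadd : PySem.Set.add seen p.2 = seen ++ [p.2] := by
          simp [PySem.Set.add, hnot]
        have hcands : cands olist (p :: rest) seen
            = (p.2, p.1 + (((PySem.List.index? olist p.2).getD 0 : Nat) : Int))
              :: cands olist rest (seen ++ [p.2]) := by
          simp only [cands, hsl, ho]
          simp
        rw [if_pos ⟨hs, hc⟩, hcands, hadd, hget p.2 hmem]
        cases best with
        | none =>
          rw [show mf ((p.2, p.1 + (((PySem.List.index? olist p.2).getD 0 : Nat) : Int))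
                :: cands olist rest (seen ++ [p.2])) (none, out)
              = mf (cands olist rest (seen ++ [p.2]))
                  (some (p.1 + (((PySem.List.index? olist p.2).getD 0 : Nat) : Int)), [p.2]) from by
            simp [mf]]
          exact ih _ _ _
        | some b =>
          simp only []
          by_cases hlt : p.1 + (((PySem.List.index? olist p.2).getD 0 : Nat) : Int) < b
          · rw [if_pos hlt,
              show mf ((p.2, p.1 + (((PySem.List.index? olist p.2).getD 0 : Nat) : Int))
                  :: cands olist rest (seen ++ [p.2])) (some b, out)
                = mf (cands olist rest (seen ++ [p.2]))
                    (some (p.1 + (((PySem.List.index? olist p.2).getD 0 : Nat) : Int)), [p.2]) from by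
              simp only [mf]; rw [if_pos hlt]]
            exact ih _ _ _
          · rw [if_neg hlt]
            by_cases heq : p.1 + (((PySem.List.index? olist p.2).getD 0 : Nat) : Int) = b
            · rw [if_pos heq,
                show mf ((p.2, p.1 + (((PySem.List.index? olist p.2).getD 0 : Nat) : Int))
                    :: cands olist rest (seen ++ [p.2])) (some b, out)
                  = mf (cands olist rest (seen ++ [p.2])) (some b, out ++ [p.2]) from by
                simp only [mf]; rw [if_neg hlt, if_pos heq]]
              exact ih _ _ _
            · rw [if_neg heq,
                show mf ((p.2, p.1 + (((PySem.List.index? olist p.2).getD 0 : Nat) : Int))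
                    :: cands olist rest (seen ++ [p.2])) (some b, out)
                  = mf (cands olist rest (seen ++ [p.2])) (some b, out) from by
                simp only [mf]; rw [if_neg hlt, if_neg heq]]
              exact ih _ _ _
      · have ho : olist.contains p.2 = false := by rw [← hcont]; simpa using hc
        have hsl : List.contains seen p.2 = false := by simpa using hs
        have hcands : cands olist (p :: rest) seen = cands olist rest seen := by
          simp only [cands, hsl, ho]
          simp
        rw [if_neg (by intro h; exact hc h.2), hcands]
        exact ih _ _ _
    · have hsl : ¬ (List.contains seen p.2 = false) := by simpa using hs
      have hcands : cands olist (p :: rest) seen = cands olist rest seen := by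
        simp only [cands]
        rw [if_neg hsl]
      rw [if_neg (by intro h; exact hs h.1), hcands]
      exact ih _ _ _

-- proof-only names for the two programs' bodies after (mlist, olist) has been chosen
def adictA (mlist olist : List String) : PySem.Dict String Int :=
  (PySem.List.pyRange 0 (PySem.List.len mlist) 1).foldl (fun d i =>
    let s := PySem.List.pyGetD mlist i ""
    if d.contains s = false then
      if olist.contains s then
        d.insert s (i + (((PySem.List.index? olist s).getD 0 : Nat) : Int))
      else d
    else d) PySem.Dict.empty

def resA (mlist olist : List String) : List (String × Int) :=
  PySem.List.sorted (adictA mlist olist).items (fun p => p.2) false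

def Acore (mlist olist : List String) : List String :=
  match PySem.List.pyGet? (resA mlist olist) 0 with
  | none => []
  | some r0 => loopA r0.2 (resA mlist olist) []

def posB (olist : List String) : PySem.Dict String Int :=
  (PySem.List.enumerate olist).foldl (fun d p =>
    if d.contains p.2 = true then d else d.insert p.2 p.1) PySem.Dict.empty

def Bcore (mlist olist : List String) : List String :=
  ((PySem.List.enumerate mlist).foldl (fun (st : Option Int × List String × PySem.Set String) p =>
    if PySem.Set.contains st.2.2 p.2 = false ∧ (posB olist).contains p.2 = true then
      let seen := PySem.Set.add st.2.2 p.2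
      let t := p.1 + (posB olist).getD p.2 0
      match st.1 with
      | none => (some t, [p.2], seen)
      | some b =>
        if t < b then (some t, [p.2], seen)
        else if t = b then (some b, st.2.1 ++ [p.2], seen)
        else (some b, st.2.1, seen)
    else st) ((none : Option Int), ([] : List String), PySem.Set.empty)).2.1

def minv : List (String × Int) → Int
  | [] => 0
  | q :: rest => vmin q.2 rest

theorem adictA_items (mlist olist : List String) :
    (adictA mlist olist).items = cands olist (PySem.List.enumerate mlist) [] := by
  unfold adictA
  rw [show (fun (d : PySem.Dict String Int) (i : Int) =>
        let s := PySem.List.pyGetD mlist i ""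
        if d.contains s = false then
          if olist.contains s then
            d.insert s (i + (((PySem.List.index? olist s).getD 0 : Nat) : Int))
          else d
        else d) = (fun d i => stepA olist d (i, PySem.List.pyGetD mlist i "")) from rfl]
  rw [show (PySem.List.pyRange 0 (PySem.List.len mlist) 1).foldl
        (fun d i => stepA olist d (i, PySem.List.pyGetD mlist i "")) PySem.Dict.empty
      = (PySem.List.enumerate mlist).foldl (stepA olist) PySem.Dict.empty from by
    rw [PySem.List.enumerate_eq_map_pyRange mlist "", List.foldl_map]]
  rw [dict_items olist (PySem.List.enumerate mlist) PySem.Dict.empty (by simp)]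
  simp [show (PySem.Dict.empty : PySem.Dict String Int).items = [] from rfl]

theorem cands_ne_nil (mlist olist : List String) (h : ∃ s ∈ mlist, s ∈ olist) :
    cands olist (PySem.List.enumerate mlist) [] ≠ [] := by
  intro hnil
  obtain ⟨s, hs1, hs2⟩ := h
  obtain ⟨k, hk, hks⟩ := List.mem_iff_getElem.mp hs1
  have hp : (((0 : Int) + (k : Int)), s) ∈ PySem.List.enumerate mlist := by
    rw [PySem.List.mem_enumerate_iff]
    exact ⟨k, hk, by rw [hks]⟩
  have := cands_nil_no_common olist (PySem.List.enumerate mlist) [] hnil _ hp hs2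
  simp at this

theorem coreA (mlist olist : List String) (h : ∃ s ∈ mlist, s ∈ olist) :
    Acore mlist olist
      = ((cands olist (PySem.List.enumerate mlist) []).filter
          (fun r => r.2 == minv (cands olist (PySem.List.enumerate mlist) []))).map (·.1) := by
  have hCne := cands_ne_nil mlist olist h
  obtain ⟨q, rest, hCc⟩ : ∃ q rest, cands olist (PySem.List.enumerate mlist) [] = q :: rest := by
    cases hx : cands olist (PySem.List.enumerate mlist) [] with
    | nil => exact absurd hx hCne
    | cons a b => exact ⟨a, b, rfl⟩
  have hsne : resA mlist olist ≠ [] := by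
    unfold resA
    rw [Ne, PySem.List.sorted_eq_nil_iff, adictA_items]
    exact hCne
  obtain ⟨r0, tl, hr⟩ : ∃ r0 tl, resA mlist olist = r0 :: tl := by
    cases hx : resA mlist olist with
    | nil => exact absurd hx hsne
    | cons a b => exact ⟨a, b, rfl⟩
  have hrC : PySem.List.sorted (cands olist (PySem.List.enumerate mlist) []) (fun p => p.2) false
      = r0 :: tl := by
    rw [← adictA_items mlist olist]; exact hr
  have hkey : ∀ y ∈ cands olist (PySem.List.enumerate mlist) [], r0.2 ≤ y.2 :=
    PySem.List.key_head_sorted_le (cands olist (PySem.List.enumerate mlist) [])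
      (fun (p : String × Int) => p.2) hrC
  have hr0mem : r0 ∈ cands olist (PySem.List.enumerate mlist) [] := by
    rw [← PySem.List.mem_sorted _ (fun p => p.2) false, hrC]
    exact List.mem_cons_self
  have hvle := vmin_le rest q.2
  have hmin_eq : r0.2 = minv (cands olist (PySem.List.enumerate mlist) []) := by
    rw [hCc]
    show r0.2 = vmin q.2 rest
    have h1 : r0.2 ≤ vmin q.2 rest := by
      rcases vmin_attained rest q.2 with he | ⟨p, hp, he⟩
      · rw [he]; exact hkey q (by rw [hCc]; exact List.mem_cons_self)
      · rw [he]; exact hkey p (by rw [hCc]; exact List.mem_cons_of_mem _ hp)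
    have h2 : vmin q.2 rest ≤ r0.2 := by
      rcases List.mem_cons.mp (by rw [← hCc]; exact hr0mem : r0 ∈ q :: rest) with he | hm
      · rw [he]; exact hvle.1
      · exact hvle.2 r0 hm
    omega
  have hget0 : PySem.List.pyGet? (resA mlist olist) 0 = some r0 := by
    rw [hr]; simp [PySem.List.pyGet?, PySem.List.pyIdx?]
  unfold Acore
  rw [hget0]
  simp only []
  rw [loopA_eq, hr]
  rw [takeWhile_eq_filter_min r0.2 (r0 :: tl)
        (by intro y hy; exact hkey y (by rw [← PySem.List.mem_sorted _ (fun p => p.2) false, hrC]; exact hy))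
        (by rw [← hrC]; exact PySem.List.sorted_pairwise _ _)]
  rw [show (r0 :: tl) = PySem.List.sorted (cands olist (PySem.List.enumerate mlist) []) (fun p => p.2) false from hrC.symm]
  rw [sorted_filter, hmin_eq]
  simp

theorem posB_get? (olist : List String) (s : String) :
    (posB olist).get? s = (PySem.List.index? olist s).map (fun n => ((n : Nat) : Int)) := by
  unfold posB
  rw [posfold_get?, find?_enumerate]
  cases PySem.List.index? olist s <;> simp

theorem posB_contains (olist : List String) (s : String) :
    (posB olist).contains s = olist.contains s := by
  rw [PySem.Dict.contains_eq_isSome_get?, posB_get?]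
  cases hidx : PySem.List.index? olist s with
  | none =>
    have hnm := (PySem.List.index?_eq_none_iff olist s).mp hidx
    simp [hnm]
  | some n =>
    have hm : s ∈ olist := by
      rw [← PySem.List.index?_isSome_iff olist s, hidx]; rfl
    simp [hm]

theorem posB_getD (olist : List String) (s : String) (hm : s ∈ olist) :
    (posB olist).getD s 0 = (((PySem.List.index? olist s).getD 0 : Nat) : Int) := by
  rw [PySem.Dict.getD_eq_get?_getD, posB_get?]
  cases hidx : PySem.List.index? olist s with
  | none =>
    exact absurd ((PySem.List.index?_eq_none_iff olist s).mp hidx) (by simpa using hm)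
  | some n => simp

theorem coreB (mlist olist : List String) :
    Bcore mlist olist = (mf (cands olist (PySem.List.enumerate mlist) []) (none, [])).2 := by
  unfold Bcore
  exact bloop olist (posB olist) (posB_contains olist) (posB_getD olist)
    (PySem.List.enumerate mlist) none [] []

-- the two programs agree once (mlist, olist) has been chosen
theorem core (mlist olist : List String) (h : ∃ s ∈ mlist, s ∈ olist) :
    Acore mlist olist = Bcore mlist olist := by
  obtain ⟨q, rest, hCc⟩ : ∃ q rest, cands olist (PySem.List.enumerate mlist) [] = q :: rest := by
    cases hx : cands olist (PySem.List.enumerate mlist) [] with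
    | nil => exact absurd hx (cands_ne_nil mlist olist h)
    | cons a b => exact ⟨a, b, rfl⟩
  rw [coreA mlist olist h, coreB, hCc, mf_min]
  simp only [minv]

-- ===== VERDICT (by name: the statement is the Claim_ definition above) =====
theorem findRestaurant2_spec : Claim_equal_findRestaurant2 := by
  intro l1 l2 _ hpre
  unfold Spec_findRestaurant2
  obtain ⟨s, hs1, hs2⟩ := hpre
  by_cases hle : PySem.List.len l1 ≤ PySem.List.len l2
  · have hm : min (PySem.List.len l1) (PySem.List.len l2) = PySem.List.len l1 :=
      min_eq_left hle
    have hA : findRestaurant2 l1 l2 = Acore l1 l2 := by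
      simp only [findRestaurant2, Acore, resA, adictA, hm]
      simp
    have hB : findRestaurant2_alt l1 l2 = Bcore l1 l2 := by
      simp only [findRestaurant2_alt, Bcore, posB, if_pos hle]; rfl
    rw [hA, hB]
    exact core l1 l2 ⟨s, hs1, hs2⟩
  · have hm : min (PySem.List.len l1) (PySem.List.len l2) = PySem.List.len l2 :=
      min_eq_right (by omega)
    have hne : ¬ (PySem.List.len l2 = PySem.List.len l1) := by omega
    have hA : findRestaurant2 l1 l2 = Acore l2 l1 := by
      simp only [findRestaurant2, Acore, resA, adictA, hm, if_neg hne]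
    have hB : findRestaurant2_alt l1 l2 = Bcore l2 l1 := by
      simp only [findRestaurant2_alt, Bcore, posB, if_neg hle]; rfl
    rw [hA, hB]
    exact core l2 l1 ⟨s, hs2, hs1⟩
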